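-- pv_equiv track=rewrite | github.com/walter789dev/Reclutamiento-de-Mutantes-X-Men- | functions/validate_mutants.py | validate_vertical
-- ===== SOURCE A (Python) =====
-- def validate_vertical(dna, base):
--    coincidence = 0 # Incrementara si se encontro una horizontal de 4 bases iguales.
--    count = 0 # Contara las apariciones de la misma base
--    size = len(base)
--
--    for x in range(len(dna)):
--       elm_coincidence = dna[0][x]
--       for y in range(len(dna)):
--          # Dejara de validar si ya encontro la secuencia
--          if count == size: break
--          if elm_coincidence == dna[y][x]: count += 1
--          else:
--             # Reseteo el contador si el valor actual no coincide con el anterior.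
--             elm_coincidence = dna[y][x]
--             count = 1
--       # Size + 1 es para cuando la vertical esta al final de la linea.
--       if count in [size, size + 1]: coincidence += 1
--       count = 0
--    else:
--       return coincidence
-- ===== SOURCE B (Python) =====
-- def validate_vertical(dna, base):
--     n = len(dna)
--     size = len(base)
--     coincidence = 0
--     for x in range(n):
--         col = [dna[y][x] for y in range(n)]
--         # brute-force window search: does any window of `size` consecutive
--         # entries of the column consist of equal characters?
--         if any(all(col[y + i] == col[y] for i in range(size))
--                for y in range(n - size + 1)):
--             coincidence += 1
--     return coincidence
-- ===== Notes on version B (the rewrite author's own statement) =====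
-- stated objective: alternative
-- what changed: A's single-pass run-length counter with an early break and a size/size+1 membership test is replaced by a brute-force sliding-window search: each column is extracted and counted if ANY window of len(base) consecutive entries is all-equal.
-- outside the precondition, e.g. on validate_vertical(['aa', 'a'], 'a'): A returns 2, B raises IndexError
import Mathlib
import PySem

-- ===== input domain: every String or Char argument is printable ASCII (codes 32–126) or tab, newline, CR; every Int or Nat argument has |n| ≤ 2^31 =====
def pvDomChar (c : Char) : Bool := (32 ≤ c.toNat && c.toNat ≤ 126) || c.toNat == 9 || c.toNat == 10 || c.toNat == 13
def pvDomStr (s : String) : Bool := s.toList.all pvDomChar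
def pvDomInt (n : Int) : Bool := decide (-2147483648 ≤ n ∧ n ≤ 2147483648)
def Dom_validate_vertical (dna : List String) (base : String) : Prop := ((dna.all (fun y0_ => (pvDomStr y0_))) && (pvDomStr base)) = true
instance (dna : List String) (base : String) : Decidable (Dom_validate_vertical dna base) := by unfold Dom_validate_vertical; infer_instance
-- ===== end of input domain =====

-- B replaces A's fused run-length scan (carried counter, early break, size/size+1 membership test)
-- by a brute-force sliding-window search per column; objective: alternative algorithm.

-- ===== PORT A =====

-- dna[y][x]; exact wherever Pre_ holds (both indices in range; the default is never read there)
def vvChar (dna : List String) (y x : Nat) : Char :=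
  ((dna.getD y "").toList).getD x ' '

-- the inner 'for y in range(len(dna))' loop with its break; returns the final count
def vvInnerA (dna : List String) (x : Nat) (size : Nat) : List Nat → Char → Nat → Nat
  | [], _, count => count
  | y :: ys, elm, count =>
    if count = size then count
    else if elm = vvChar dna y x then vvInnerA dna x size ys elm (count + 1)
    else vvInnerA dna x size ys (vvChar dna y x) 1

def validate_vertical (dna : List String) (base : String) : Int :=
  let size := base.toList.length
  (List.range dna.length).foldl
    (fun coincidence x =>
      let count := vvInnerA dna x size (List.range dna.length) (vvChar dna 0 x) 0
      if count = size ∨ count = size + 1 then coincidence + 1 else coincidence)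
    0

-- ===== PORT B =====

def validate_vertical_alt (dna : List String) (base : String) : Int :=
  let n := dna.length
  let size := base.toList.length
  (List.range n).foldl
    (fun coincidence x =>
      let col := (List.range n).map (fun y => vvChar dna y x)
      if (PySem.List.pyRange 0 ((n : Int) - (size : Int) + 1) 1).any (fun y =>
           (PySem.List.pyRange 0 (size : Int) 1).all (fun i =>
             col.getD (y + i).toNat ' ' == col.getD y.toNat ' '))
      then coincidence + 1 else coincidence)
    0

-- ===== PRECONDITION & SPEC =====
-- Pre_ excludes ragged inputs (a row shorter than the number of rows), where indexing dna[y][x] can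
-- raise IndexError: B always raises there, while A sometimes still returns only because its early
-- break happens to skip the out-of-range access.
def Pre_validate_vertical (dna : List String) (base : String) : Prop :=
  ∀ s ∈ dna, dna.length ≤ s.toList.length
instance (dna : List String) (base : String) : Decidable (Pre_validate_vertical dna base) := by unfold Pre_validate_vertical; infer_instance

def pvWitness_validate_vertical : List String × String := (["AT", "AG"], "A")

def Spec_validate_vertical (dna : List String) (base : String) (out : Int) : Prop := out = validate_vertical_alt dna base
instance (dna : List String) (base : String) (out : Int) : Decidable (Spec_validate_vertical dna base out) := by unfold Spec_validate_vertical; infer_instance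

-- ===== CLAIM (what is proved, stated in full; the proofs are below) =====
def Claim_equal_validate_vertical : Prop := ∀ (dna : List String) (base : String), Dom_validate_vertical dna base → Pre_validate_vertical dna base → Spec_validate_vertical dna base (validate_vertical dna base)

-- ===== LEMMAS AND PROOFS =====

-- maximum run length of e^cnt ++ l (a recursion both ports are compared against)
def vvExt (l : List Char) (e : Char) (cnt : Nat) : Nat :=
  match l with
  | [] => cnt
  | c :: l' => if e = c then vvExt l' e (cnt + 1) else max cnt (vvExt l' c 1)

theorem vvExt_ge (l : List Char) (e : Char) (cnt : Nat) : cnt ≤ vvExt l e cnt := by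
  induction l generalizing e cnt with
  | nil => simp [vvExt]
  | cons c l ih =>
    simp only [vvExt]
    split
    · exact le_trans (Nat.le_succ _) (ih _ _)
    · exact le_max_left _ _

-- A's inner loop, re-expressed over the chars it reads
def vvScanA (size : Nat) : List Char → Char → Nat → Nat
  | [], _, count => count
  | c :: l, elm, count =>
    if count = size then count
    else if elm = c then vvScanA size l elm (count + 1)
    else vvScanA size l c 1

theorem vvInnerA_eq_scan (dna : List String) (x size : Nat) (ys : List Nat) (elm : Char) (count : Nat) :
    vvInnerA dna x size ys elm count = vvScanA size (ys.map (fun y => vvChar dna y x)) elm count := by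
  induction ys generalizing elm count with
  | nil => rfl
  | cons y ys ih => simp only [vvInnerA, List.map, vvScanA]; split_ifs <;> simp [ih]

theorem vvScanA_le (size : Nat) (l : List Char) (e : Char) (count : Nat) (h : count ≤ size) :
    vvScanA size l e count ≤ size := by
  induction l generalizing e count with
  | nil => exact h
  | cons c l ih =>
    simp only [vvScanA]
    split_ifs with h1 h2
    · omega
    · exact ih _ _ (by omega)
    · exact ih _ _ (by omega)

theorem vvScanA_eq_iff (size : Nat) (l : List Char) (e : Char) (count : Nat) (h : count ≤ size) :
    vvScanA size l e count = size ↔ size ≤ vvExt l e count := by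
  induction l generalizing e count with
  | nil => simp only [vvScanA, vvExt]; omega
  | cons c l ih =>
    simp only [vvScanA, vvExt]
    by_cases h1 : count = size
    · simp only [if_pos h1]
      have h2 := vvExt_ge l e (count + 1)
      have h3 := vvExt_ge l c 1
      by_cases hc : e = c
      · simp only [if_pos hc]; omega
      · simp only [if_neg hc]; omega
    · simp only [if_neg h1]
      by_cases hc : e = c
      · subst hc
        simp only [if_true]
        exact ih e (count + 1) (by omega)
      · simp only [if_neg hc]
        rw [ih c 1 (by omega)]
        have := vvExt_ge l c 1
        omega

-- length of the leading run of c in l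
def vvLead (c : Char) : List Char → Nat
  | [] => 0
  | d :: t => if c = d then 1 + vvLead c t else 0

theorem lead_iff_getD (c : Char) (t : List Char) (m : Nat) :
    m ≤ vvLead c t ↔ m ≤ t.length ∧ ∀ i < m, t.getD i ' ' = c := by
  induction t generalizing m with
  | nil =>
    simp only [vvLead, List.length_nil]
    constructor
    · intro h; exact ⟨h, by omega⟩
    · intro ⟨h, _⟩; exact h
  | cons d t ih =>
    cases m with
    | zero => simp
    | succ m' =>
      simp only [vvLead, List.length_cons]
      split_ifs with hc
      · subst hc
        rw [show (m' + 1 ≤ 1 + vvLead c t ↔ m' ≤ vvLead c t) by omega, ih]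
        constructor
        · intro ⟨h1, h2⟩
          refine ⟨by omega, fun i hi => ?_⟩
          cases i with
          | zero => rfl
          | succ i' => exact h2 i' (by omega)
        · intro ⟨h1, h2⟩
          exact ⟨by omega, fun i hi => h2 (i + 1) (by omega)⟩
      · constructor
        · omega
        · intro ⟨_, h2⟩
          have := h2 0 (by omega)
          simp only [List.getD_cons_zero] at this
          exact absurd this.symm hc

theorem take_replicate_iff_lead (c : Char) (t : List Char) (m : Nat) :
    t.take m = List.replicate m c ↔ m ≤ vvLead c t := by
  induction t generalizing m with
  | nil =>
    cases m with
    | zero => simp [vvLead]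
    | succ m' => simp [vvLead, List.replicate]
  | cons d t ih =>
    cases m with
    | zero => simp
    | succ m' =>
      simp only [List.take_succ_cons, List.replicate, List.cons.injEq, vvLead]
      split_ifs with hc
      · subst hc; simp only [ih, true_and]; omega
      · constructor
        · intro ⟨h, _⟩; exact absurd h.symm hc
        · omega

-- 'some window of k consecutive equal entries', recursively
def vvW : Nat → List Char → Prop
  | 0, _ => True
  | _ + 1, [] => False
  | k + 1, c :: t => t.take k = List.replicate k c ∨ vvW (k + 1) t

theorem vvExt_iff_W_aux (t : List Char) (c : Char) (j k : Nat) :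
    k ≤ vvExt t c (j + 1) ↔ (k ≤ j + 1 + vvLead c t ∨ vvW k t) := by
  induction t generalizing c j with
  | nil =>
    cases k with
    | zero => simp [vvExt, vvW, vvLead]
    | succ k' => simp [vvExt, vvW, vvLead]
  | cons d t ih =>
    simp only [vvExt, vvLead]
    split_ifs with hc
    · subst hc
      rw [show j + 1 + 1 = (j + 1) + 1 by omega, ih]
      cases k with
      | zero => simp [vvW]
      | succ m =>
        simp only [vvW, take_replicate_iff_lead]
        constructor
        · rintro (h | h)
          · left; omega
          · right; right; exact h
        · rintro (h | h | h)
          · left; omega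
          · left; omega
          · right; exact h
    · have hmax : k ≤ max (j + 1) (vvExt t d 1) ↔ k ≤ j + 1 ∨ k ≤ vvExt t d 1 := by
        omega
      rw [hmax, show (1 : Nat) = 0 + 1 by rfl, ih d 0]
      cases k with
      | zero => simp [vvW]
      | succ m =>
        simp only [vvW, take_replicate_iff_lead]
        constructor
        · rintro (h | h | h)
          · left; omega
          · right; left; omega
          · right; right; exact h
        · rintro (h | h | h)
          · left; omega
          · right; left; omega
          · right; right; exact h

theorem vvExt_iff_W (l : List Char) (e : Char) (k : Nat) :
    k ≤ vvExt l e 0 ↔ vvW k l := by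
  cases l with
  | nil =>
    cases k with
    | zero => simp [vvExt, vvW]
    | succ k' => simp [vvExt, vvW]
  | cons c t =>
    have h1 : k ≤ vvExt (c :: t) e 0 ↔ k ≤ vvExt t c 1 := by
      simp only [vvExt]
      by_cases hc : e = c
      · subst hc; simp
      · simp only [if_neg hc]
        have := vvExt_ge t c 1
        omega
    rw [h1, show (1 : Nat) = 0 + 1 by rfl, vvExt_iff_W_aux]
    cases k with
    | zero => simp [vvW]
    | succ m =>
      simp only [vvW, take_replicate_iff_lead]
      constructor
      · rintro (h | h)
        · left; omega
        · right; exact h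
      · rintro (h | h)
        · left; omega
        · right; exact h

theorem W_iff_window (k : Nat) (l : List Char) :
    vvW k l ↔ ∃ y : Nat, y + k ≤ l.length ∧ ∀ i < k, l.getD (y + i) ' ' = l.getD y ' ' := by
  induction l generalizing k with
  | nil =>
    cases k with
    | zero => simp [vvW]
    | succ m =>
      simp only [vvW, List.length_nil]
      constructor
      · intro h; exact h.elim
      · rintro ⟨y, hy, _⟩; omega
  | cons c t ih =>
    cases k with
    | zero =>
      simp only [vvW, true_iff]
      exact ⟨0, by simp, by omega⟩
    | succ m =>
      simp only [vvW, take_replicate_iff_lead, lead_iff_getD]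
      constructor
      · rintro (⟨h1, h2⟩ | h)
        · refine ⟨0, by simp; omega, fun i hi => ?_⟩
          cases i with
          | zero => rfl
          | succ i' =>
            simp only [Nat.zero_add, List.getD_cons_succ, List.getD_cons_zero]
            exact h2 i' (by omega)
        · obtain ⟨y, hy, hw⟩ := (ih (m + 1)).mp h
          refine ⟨y + 1, by simp; omega, fun i hi => ?_⟩
          simp only [show y + 1 + i = (y + i) + 1 by omega, List.getD_cons_succ]
          exact hw i hi
      · rintro ⟨y, hy, hw⟩
        cases y with
        | zero =>
          left
          refine ⟨by simp at hy; omega, fun i hi => ?_⟩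
          have := hw (i + 1) (by omega)
          simpa using this
        | succ y' =>
          right
          apply (ih (m + 1)).mpr
          refine ⟨y', by simp at hy; omega, fun i hi => ?_⟩
          have := hw i hi
          simpa [show y' + 1 + i = (y' + i) + 1 by omega] using this

-- B's per-column check, characterised
theorem bcheck_iff (col : List Char) (n size : Nat) (hn : col.length = n) :
    ((PySem.List.pyRange 0 ((n : Int) - (size : Int) + 1) 1).any (fun y =>
       (PySem.List.pyRange 0 (size : Int) 1).all (fun i =>
         col.getD (y + i).toNat ' ' == col.getD y.toNat ' ')) = true)
    ↔ ∃ y : Nat, y + size ≤ n ∧ ∀ i < size, col.getD (y + i) ' ' = col.getD y ' ' := by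
  rw [List.any_eq_true]
  constructor
  · rintro ⟨y, hy, hall⟩
    rw [PySem.List.mem_pyRange_one] at hy
    rw [List.all_eq_true] at hall
    refine ⟨y.toNat, by omega, fun i hi => ?_⟩
    have hmem : (i : Int) ∈ PySem.List.pyRange 0 (size : Int) 1 := by
      rw [PySem.List.mem_pyRange_one]
      constructor
      · exact Int.natCast_nonneg i
      · exact_mod_cast hi
    have := hall (i : Int) hmem
    rw [beq_iff_eq] at this
    have h1 : (y + (i : Int)).toNat = y.toNat + i := by omega
    rw [h1] at this
    exact this
  · rintro ⟨y, hy, hw⟩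
    refine ⟨(y : Int), ?_, ?_⟩
    · rw [PySem.List.mem_pyRange_one]
      constructor
      · exact Int.natCast_nonneg y
      · omega
    · rw [List.all_eq_true]
      intro i hi
      rw [PySem.List.mem_pyRange_one] at hi
      rw [beq_iff_eq]
      have h1 : ((y : Int) + i).toNat = y + i.toNat := by omega
      have h2 : ((y : Int)).toNat = y := by omega
      rw [h1, h2]
      exact hw i.toNat (by omega)

-- the per-column conditions of the two ports agree
theorem column_cond (dna : List String) (x size : Nat) :
    (vvInnerA dna x size (List.range dna.length) (vvChar dna 0 x) 0 = size ∨
     vvInnerA dna x size (List.range dna.length) (vvChar dna 0 x) 0 = size + 1)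
    ↔ ((PySem.List.pyRange 0 ((dna.length : Int) - (size : Int) + 1) 1).any (fun y =>
         (PySem.List.pyRange 0 (size : Int) 1).all (fun i =>
           ((List.range dna.length).map (fun y => vvChar dna y x)).getD (y + i).toNat ' '
             == ((List.range dna.length).map (fun y => vvChar dna y x)).getD y.toNat ' ')) = true) := by
  rw [vvInnerA_eq_scan]
  set col := (List.range dna.length).map (fun y => vvChar dna y x) with hcol
  have hlen : col.length = dna.length := by simp [hcol]
  have hle := vvScanA_le size col (vvChar dna 0 x) 0 (Nat.zero_le _)
  rw [bcheck_iff col dna.length size hlen, ← hlen, ← W_iff_window, ← vvExt_iff_W _ (vvChar dna 0 x)]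
  rw [← vvScanA_eq_iff size _ _ 0 (Nat.zero_le _)]
  omega

-- ===== VERDICT (by name: the statement is the Claim_ definition above) =====
theorem validate_vertical_spec : Claim_equal_validate_vertical := by
  intro dna base _hDom _hPre
  unfold Spec_validate_vertical validate_vertical validate_vertical_alt
  simp only
  congr 1
  funext coincidence x
  rw [if_congr (column_cond dna x base.toList.length) rfl rfl]
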